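-- pv_equiv track=rewrite | github.com/ivan-ivanov23/CodeWars | comfortable_words.py | comfortable_word
-- ===== SOURCE A (Python) =====
-- def comfortable_word(word):
--     left = ["q", "w", "e", "r", "t", "a", "s", "d", "f", "g", "z", "x", "c", "v", "b"]
--     right = ["y", "u", "i", "o", "p", "h", "j", "k", "l", "n", "m"]
--
--     # left -> check = 1
--     # right -> check =2
--
--     check = 0
--
--     for i in word:
--         if i in right:
--             if check != 2:
--                 check = 2
--             else:
--                 return False
--         else:
--             if check != 1:
--                 check = 1
--             else:
--                 return False
--     return True
-- ===== SOURCE B (Python) =====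
-- def comfortable_word(word):
--     right = ["y", "u", "i", "o", "p", "h", "j", "k", "l", "n", "m"]
--     if not word:
--         return True
--     first = word[0] in right
--     pattern = ([first, not first] * len(word))[:len(word)]
--     return [c in right for c in word] == pattern
-- ===== Notes on version B (the rewrite author's own statement) =====
-- stated objective: alternative
-- what changed: Replaces A's stateful scan with early returns by a construct-and-compare algorithm: build the ideal alternating hand pattern fixed by the first character, then test whole-list equality against the word's hand labels.
import Mathlib
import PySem

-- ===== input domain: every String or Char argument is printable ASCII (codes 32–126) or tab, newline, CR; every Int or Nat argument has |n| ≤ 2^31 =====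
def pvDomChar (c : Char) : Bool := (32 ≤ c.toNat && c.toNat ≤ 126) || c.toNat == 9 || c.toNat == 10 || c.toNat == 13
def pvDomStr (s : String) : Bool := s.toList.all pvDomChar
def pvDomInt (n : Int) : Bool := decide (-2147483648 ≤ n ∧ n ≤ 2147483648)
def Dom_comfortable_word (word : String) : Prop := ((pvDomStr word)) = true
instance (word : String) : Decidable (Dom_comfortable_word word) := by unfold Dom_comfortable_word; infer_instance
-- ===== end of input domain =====

-- B replaces A's stateful scan by construct-and-compare: build the ideal alternating
-- hand pattern fixed by the first character and test list equality (alternative decomposition).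

-- ===== PORT A =====
def cwRight : List Char := ['y', 'u', 'i', 'o', 'p', 'h', 'j', 'k', 'l', 'n', 'm']

-- A's for-loop with early return: recursion over the characters carrying 'check'
def cwLoopA : List Char → Int → Bool
  | [], _ => true
  | i :: rest, check =>
    if i ∈ cwRight then
      if check ≠ 2 then cwLoopA rest 2 else false
    else
      if check ≠ 1 then cwLoopA rest 1 else false

def comfortable_word (word : String) : Bool := cwLoopA word.toList 0

-- ===== PORT B =====
def cwRightB : List Char := ['y', 'u', 'i', 'o', 'p', 'h', 'j', 'k', 'l', 'n', 'm']

-- [first, not first] * len(word) is ported as flatten of replicate; [:n] as take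
def comfortable_word_alt (word : String) : Bool :=
  match word.toList with
  | [] => true
  | c :: _ =>
    let n := word.toList.length
    let first := decide (c ∈ cwRightB)
    let pattern := ((List.replicate n [first, !first]).flatten).take n
    decide (word.toList.map (fun ch => decide (ch ∈ cwRightB)) = pattern)

-- ===== PRECONDITION & SPEC =====
def Spec_comfortable_word (word : String) (out : Bool) : Prop := out = comfortable_word_alt word
instance (word : String) (out : Bool) : Decidable (Spec_comfortable_word word out) := by unfold Spec_comfortable_word; infer_instance

-- ===== CLAIM (what is proved, stated in full; the proofs are below) =====
def Claim_equal_comfortable_word : Prop := ∀ (word : String), Dom_comfortable_word word → Spec_comfortable_word word (comfortable_word word)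

-- ===== LEMMAS AND PROOFS =====
def cwLabel (c : Char) : Bool := decide (c ∈ cwRightB)

-- the ideal alternating pattern starting with hand f
def cwExpected : Bool → Nat → List Bool
  | _, 0 => []
  | f, n + 1 => f :: cwExpected (!f) n

theorem cwLabel_right (c : Char) : c ∈ cwRight → cwLabel c = true := by
  intro h; simpa [cwLabel, cwRightB, cwRight] using h

theorem cwLabel_left (c : Char) : c ∉ cwRight → cwLabel c = false := by
  intro h; simpa [cwLabel, cwRightB, cwRight] using h

theorem cwDecCons (a b : Bool) (l m : List Bool) :
    decide (a :: l = b :: m) = ((a == b) && decide (l = m)) := by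
  by_cases h1 : a = b <;> by_cases h2 : l = m <;> simp [h1, h2]

-- invariant: after a character of hand h, A's loop decides equality with the alternating pattern
theorem cwLoopA_inv (cs : List Char) (h : Bool) :
    cwLoopA cs (if h then 2 else 1) = decide (cs.map cwLabel = cwExpected (!h) cs.length) := by
  induction cs generalizing h with
  | nil => cases h <;> rfl
  | cons c rest ih =>
    have step : cwLoopA (c :: rest) (if h then 2 else 1) =
        if c ∈ cwRight then (if h then false else cwLoopA rest 2)
        else (if h then cwLoopA rest 1 else false) := by
      cases h <;> simp [cwLoopA]
    have rhs : cwExpected (!h) (rest.length + 1) = (!h) :: cwExpected h rest.length := by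
      cases h <;> rfl
    rw [step, List.map_cons, List.length_cons, rhs, cwDecCons]
    by_cases hc : c ∈ cwRight
    · rw [if_pos hc, cwLabel_right c hc]
      cases h
      · simpa using ih true
      · simp
    · rw [if_neg hc, cwLabel_left c hc]
      cases h
      · simp
      · simpa using ih false

theorem cwLoopA_start (c : Char) (rest : List Char) :
    cwLoopA (c :: rest) 0 = decide ((c :: rest).map cwLabel = cwExpected (cwLabel c) (rest.length + 1)) := by
  show (if c ∈ cwRight then _ else _) = _
  by_cases hc : c ∈ cwRight
  · rw [if_pos hc]
    simpa [cwLabel_right c hc, cwExpected, cwDecCons, List.map_cons] using cwLoopA_inv rest true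
  · rw [if_neg hc]
    simpa [cwLabel_left c hc, cwExpected, cwDecCons, List.map_cons] using cwLoopA_inv rest false

theorem cwTake_flatten (f : Bool) (n m : Nat) (hm : m ≤ 2 * n) :
    ((List.replicate n [f, !f]).flatten).take m = cwExpected f m := by
  induction n generalizing f m with
  | zero =>
    interval_cases m
    rfl
  | succ k ih =>
    rw [List.replicate_succ, List.flatten_cons]
    match m with
    | 0 => rfl
    | 1 => rfl
    | j + 2 =>
      show f :: (!f) :: List.take j _ = f :: (!f) :: cwExpected (!!f) j
      rw [Bool.not_not, show ([] : List Bool).append ((List.replicate k [f, !f]).flatten) = (List.replicate k [f, !f]).flatten from rfl]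
      rw [ih f j (by omega)]

-- ===== VERDICT (by name: the statement is the Claim_ definition above) =====
theorem comfortable_word_spec : Claim_equal_comfortable_word := by
  intro word _
  unfold Spec_comfortable_word comfortable_word comfortable_word_alt
  cases hw : word.toList with
  | nil => rfl
  | cons c rest =>
    show cwLoopA (c :: rest) 0 =
      decide (List.map (fun ch => decide (ch ∈ cwRightB)) (c :: rest) =
        List.take (c :: rest).length
          ((List.replicate (c :: rest).length [decide (c ∈ cwRightB), !decide (c ∈ cwRightB)]).flatten))
    rw [cwTake_flatten (decide (c ∈ cwRightB)) (c :: rest).length (c :: rest).length (by omega)]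
    rw [cwLoopA_start c rest]
    rfl
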